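-- pv_equiv track=rewrite | github.com/3ep-one/TinyUrlServer | UrlShortner.py | url_encoder
-- ===== SOURCE A (Python) =====
-- def url_encoder(id):
--     characters = "0123456789abcdefghijklmnopqrstuvwxyz\
--         ABCDEFGHIJKLMNOPQRSTUVWXYZ"
--     base = len(characters)
--     encoden_url = []
--     while id > 0:
--         val = id % base
--         encoden_url.append(characters[val])
--         id = (id // base)
--     return "".join(encoden_url[::-1])
-- ===== SOURCE B (Python) =====
-- def url_encoder(id):
--     characters = "0123456789abcdefghijklmnopqrstuvwxyz\
--         ABCDEFGHIJKLMNOPQRSTUVWXYZ"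
--     base = len(characters)
--     if id <= 0:
--         return ""
--     power = 1
--     while power * base <= id:
--         power *= base
--     out = ""
--     while power > 0:
--         out += characters[(id // power) % base]
--         power //= base
--     return out
-- ===== Notes on version B (the rewrite author's own statement) =====
-- stated objective: alternative
-- what changed: B replaces A's peel-least-significant-digit-then-reverse loop by a magnitude-first scheme: it finds the largest power of the base not exceeding id, then emits digits most-significant-first by repeated division of the power, so no list is built and nothing is reversed.
import Mathlib
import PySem

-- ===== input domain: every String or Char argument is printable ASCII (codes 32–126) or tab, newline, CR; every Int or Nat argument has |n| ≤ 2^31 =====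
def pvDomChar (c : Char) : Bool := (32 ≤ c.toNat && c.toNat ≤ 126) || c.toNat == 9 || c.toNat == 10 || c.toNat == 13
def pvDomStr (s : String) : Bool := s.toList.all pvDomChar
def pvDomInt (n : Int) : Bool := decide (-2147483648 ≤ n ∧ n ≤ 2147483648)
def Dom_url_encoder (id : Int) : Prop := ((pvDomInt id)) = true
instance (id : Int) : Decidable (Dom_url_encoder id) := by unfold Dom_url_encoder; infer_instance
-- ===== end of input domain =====

-- B replaces A's peel-least-significant-digit-then-reverse loop by a magnitude-first loop
-- (find the largest power of the base ≤ id, then emit digits most-significant-first): same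
-- outputs, no list reversal; objective "alternative", no speed claim.

-- the alphabet literal verbatim, including the 8 spaces the Python line continuation embeds (so len = 70)
def pvCharsStr : String := "0123456789abcdefghijklmnopqrstuvwxyz        ABCDEFGHIJKLMNOPQRSTUVWXYZ"
def pvChars : List Char := pvCharsStr.toList

-- base = len(characters)
def pvBase : Int := PySem.Str.len pvCharsStr

theorem pvBase_eq : pvBase = 70 := by decide

-- termination helper for the division loops (cited by the ports' decreasing_by)
theorem pv_floordiv70_lt {a : Int} (h : 0 < a) : (PySem.Int.floordiv a 70).toNat < a.toNat := by
  rw [PySem.Int.floordiv_eq_ediv_of_pos (by norm_num)]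
  have h1 : a / 70 < a := by
    rw [Int.ediv_lt_iff_lt_mul (by norm_num)]
    nlinarith
  have h2 : 0 ≤ a / 70 := Int.ediv_nonneg h.le (by norm_num)
  omega

-- ===== PORT A =====
-- the while loop: appends characters[id % base] and replaces id by id // base
def urlLoopA (id : Int) (acc : List Char) : List Char :=
  if 0 < id then
    let val := PySem.Int.mod id pvBase
    urlLoopA (PySem.Int.floordiv id pvBase) (acc ++ [PySem.List.pyGetD pvChars val ' '])
  else acc
termination_by id.toNat
decreasing_by simpa [pvBase_eq] using pv_floordiv70_lt (by omega)
-- "".join(encoden_url[::-1]): the list holds single characters, so the join is String.ofList of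
-- the reversed char list ([::-1] is reverse, PySem.List.slice?_none_none_neg_one; the default ' '
-- of pyGetD is never used: 0 ≤ id % 70 < 70 = len(characters))
def url_encoder (id : Int) : String := String.ofList ((urlLoopA id []).reverse)

-- ===== PORT B =====
-- while power * base <= id: power *= base   ('if power ≤ 0' is a totality guard only; B always starts at power = 1)
def urlPowB (id power : Int) : Int :=
  if power ≤ 0 then power
  else if power * pvBase ≤ id then urlPowB id (power * pvBase) else power
termination_by (id + 1 - power).toNat
decreasing_by
  rename_i hle
  rw [pvBase_eq] at hle
  rw [pvBase_eq]; omega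

-- while power > 0: out += characters[(id // power) % base]; power //= base
def urlEmitB (id power : Int) (out : List Char) : List Char :=
  if 0 < power then
    urlEmitB id (PySem.Int.floordiv power pvBase)
      (out ++ [PySem.List.pyGetD pvChars (PySem.Int.mod (PySem.Int.floordiv id power) pvBase) ' '])
  else out
termination_by power.toNat
decreasing_by simpa [pvBase_eq] using pv_floordiv70_lt (by omega)

def url_encoder_alt (id : Int) : String :=
  if id ≤ 0 then "" else String.ofList (urlEmitB id (urlPowB id 1) [])

-- ===== PRECONDITION & SPEC =====
def Spec_url_encoder (id : Int) (out : String) : Prop := out = url_encoder_alt id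
instance (id : Int) (out : String) : Decidable (Spec_url_encoder id out) := by unfold Spec_url_encoder; infer_instance

-- ===== CLAIM (what is proved, stated in full; the proofs are below) =====
def Claim_equal_url_encoder : Prop := ∀ (id : Int), Dom_url_encoder id → Spec_url_encoder id (url_encoder id)

-- ===== LEMMAS AND PROOFS =====

def pvDigit (id : Int) : Char := PySem.List.pyGetD pvChars (PySem.Int.mod id 70) ' '

theorem fd70 (a : Int) : PySem.Int.floordiv a 70 = a / 70 :=
  PySem.Int.floordiv_eq_ediv_of_pos (by norm_num)

theorem loopA_acc : ∀ (n : Nat) (id : Int), id.toNat ≤ n →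
    ∀ acc, urlLoopA id acc = acc ++ urlLoopA id [] := by
  intro n
  induction n with
  | zero =>
    intro id h acc
    have hid : ¬ 0 < id := by omega
    rw [urlLoopA]
    conv_rhs => rw [urlLoopA]
    simp [hid]
  | succ n ih =>
    intro id h acc
    rw [urlLoopA]
    conv_rhs => rw [urlLoopA]
    by_cases hid : 0 < id
    · simp only [hid, if_pos, List.nil_append, pvBase_eq]
      have hm := pv_floordiv70_lt hid
      rw [ih (PySem.Int.floordiv id 70) (by omega)
            (acc ++ [PySem.List.pyGetD pvChars (PySem.Int.mod id 70) ' ']),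
          ih (PySem.Int.floordiv id 70) (by omega)
            [PySem.List.pyGetD pvChars (PySem.Int.mod id 70) ' ']]
      simp
    · simp [hid]

theorem loopA_rec (id : Int) (h : 0 < id) :
    (urlLoopA id []).reverse = (urlLoopA (PySem.Int.floordiv id 70) []).reverse ++ [pvDigit id] := by
  conv_lhs => rw [urlLoopA]
  simp only [h, if_pos, pvBase_eq, List.nil_append]
  rw [loopA_acc (PySem.Int.floordiv id 70).toNat _ le_rfl]
  simp [pvDigit]

theorem loopA_nil (id : Int) (h : id ≤ 0) : urlLoopA id [] = [] := by
  rw [urlLoopA]; simp; omega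

theorem emit_acc : ∀ (n : Nat) (power id : Int), power.toNat ≤ n →
    ∀ out, urlEmitB id power out = out ++ urlEmitB id power [] := by
  intro n
  induction n with
  | zero =>
    intro p id h out
    have hp : ¬ 0 < p := by omega
    rw [urlEmitB]
    conv_rhs => rw [urlEmitB]
    simp [hp]
  | succ n ih =>
    intro p id h out
    rw [urlEmitB]
    conv_rhs => rw [urlEmitB]
    by_cases hp : 0 < p
    · simp only [hp, if_pos, List.nil_append, pvBase_eq]
      have hm := pv_floordiv70_lt hp
      rw [ih (PySem.Int.floordiv p 70) id (by omega)
            (out ++ [PySem.List.pyGetD pvChars (PySem.Int.mod (PySem.Int.floordiv id p) 70) ' ']),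
          ih (PySem.Int.floordiv p 70) id (by omega)
            [PySem.List.pyGetD pvChars (PySem.Int.mod (PySem.Int.floordiv id p) 70) ' ']]
      simp
    · simp [hp]

theorem emit_nonpos (id power : Int) (h : power ≤ 0) : urlEmitB id power [] = [] := by
  rw [urlEmitB]; simp; omega

theorem emit_step (id p : Int) (hp : 0 < p) :
    urlEmitB id p [] =
      PySem.List.pyGetD pvChars (PySem.Int.mod (PySem.Int.floordiv id p) 70) ' '
        :: urlEmitB id (PySem.Int.floordiv p 70) [] := by
  conv_lhs => rw [urlEmitB]
  simp only [hp, if_pos, pvBase_eq, List.nil_append]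
  rw [emit_acc (PySem.Int.floordiv p 70).toNat _ id le_rfl]
  simp

theorem emit_pow : ∀ (k : Nat) (id : Int),
    urlEmitB id ((70:Int)^k) [] =
      urlEmitB (PySem.Int.floordiv id 70) (PySem.Int.floordiv ((70:Int)^k) 70) [] ++ [pvDigit id] := by
  intro k
  induction k with
  | zero =>
    intro id
    have h1 : PySem.Int.floordiv (1:Int) 70 = 0 := by decide
    have h2 : PySem.Int.floordiv id 1 = id := by
      rw [PySem.Int.floordiv_eq_ediv_of_pos (by norm_num : (0:Int) < 1), Int.ediv_one]
    rw [pow_zero, emit_step id 1 (by norm_num), h1, h2,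
        emit_nonpos _ 0 le_rfl, emit_nonpos _ 0 le_rfl]
    simp [pvDigit]
  | succ k ih =>
    intro id
    have hpow : (0:Int) < 70 ^ (k + 1) := by positivity
    have hk : (0:Int) < 70 ^ k := by positivity
    have hfd : PySem.Int.floordiv ((70:Int)^(k+1)) 70 = 70 ^ k := by
      rw [fd70, pow_succ, Int.mul_ediv_cancel _ (by norm_num)]
    have hdd : PySem.Int.floordiv (PySem.Int.floordiv id 70) ((70:Int)^k)
        = PySem.Int.floordiv id ((70:Int)^(k+1)) := by
      rw [fd70, PySem.Int.floordiv_eq_ediv_of_pos hk,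
          PySem.Int.floordiv_eq_ediv_of_pos hpow,
          Int.ediv_ediv_of_nonneg (by norm_num), ← pow_succ']
    rw [emit_step id (70^(k+1)) hpow, hfd, ih id,
        emit_step (PySem.Int.floordiv id 70) (70^k) hk, hdd]
    simp

theorem pow_shift : ∀ (n : Nat) (id p : Int), (id + 1 - p).toNat ≤ n → 1 ≤ p → p * 70 ≤ id →
    urlPowB id (p * 70) = 70 * urlPowB (PySem.Int.floordiv id 70) p := by
  intro n
  induction n with
  | zero =>
    intro id p hn hp hle
    have : p < p * 70 := by nlinarith
    omega
  | succ n ih =>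
    intro id p hn hp hle
    rw [urlPowB]
    conv_rhs => rw [urlPowB]
    have h1 : ¬ (p * 70 ≤ 0) := by nlinarith
    have h2 : ¬ (p ≤ 0) := by omega
    simp only [h1, h2, if_neg, not_false_iff, pvBase_eq]
    have hiff : p * 70 ≤ PySem.Int.floordiv id 70 ↔ p * 70 * 70 ≤ id := by
      rw [fd70]; exact Int.le_ediv_iff_mul_le (by norm_num)
    by_cases hc : p * 70 * 70 ≤ id
    · rw [if_pos hc, if_pos (hiff.mpr hc)]
      have hlt : p < p * 70 := by nlinarith
      have hdec : (id + 1 - p * 70).toNat ≤ n := by omega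
      exact ih id (p * 70) hdec (by nlinarith) hc
    · rw [if_neg hc, if_neg (fun h => hc (hiff.mp h))]
      ring

theorem pow_is_pow : ∀ (n : Nat) (id p : Int) (k : Nat), (id + 1 - p).toNat ≤ n → p = 70 ^ k →
    ∃ m : Nat, urlPowB id p = 70 ^ m := by
  intro n
  induction n with
  | zero =>
    intro id p k hn hp
    have h70 : (0:Int) < 70 ^ k := by positivity
    have hmul : (70:Int) ^ k ≤ 70 ^ k * 70 := by nlinarith
    rw [urlPowB]
    rw [if_neg (by omega), if_neg (by rw [pvBase_eq]; omega)]
    exact ⟨k, hp⟩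
  | succ n ih =>
    intro id p k hn hp
    have h70 : (0:Int) < 70 ^ k := by positivity
    rw [urlPowB]
    rw [if_neg (by omega)]
    rw [pvBase_eq]
    by_cases hc : p * 70 ≤ id
    · rw [if_pos hc]
      have hlt : p < p * 70 := by nlinarith [hp ▸ h70]
      exact ih id (p * 70) (k + 1) (by omega) (by rw [hp, pow_succ])
    · rw [if_neg hc]; exact ⟨k, hp⟩

-- B's result as a char list
def pvBf (id : Int) : List Char :=
  if id ≤ 0 then [] else urlEmitB id (urlPowB id 1) []

theorem pow_one_small (id : Int) (h : id < 70) : urlPowB id 1 = 1 := by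
  rw [urlPowB]
  rw [if_neg (by norm_num)]
  simp only [pvBase_eq]
  rw [if_neg (by omega)]

theorem bf_rec (id : Int) (h : 0 < id) :
    pvBf id = pvBf (PySem.Int.floordiv id 70) ++ [pvDigit id] := by
  by_cases hs : id < 70
  · have hq : PySem.Int.floordiv id 70 = 0 := by
      rw [fd70]; exact Int.ediv_eq_zero_of_lt h.le hs
    have h1 : pvBf id = [pvDigit id] := by
      unfold pvBf
      rw [if_neg (by omega), pow_one_small id hs]
      have := emit_pow 0 id
      simpa [emit_nonpos] using this
    rw [h1, hq]; simp [pvBf]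
  · have hs' : 70 ≤ id := by omega
    have hq1 : (1:Int) ≤ PySem.Int.floordiv id 70 := by
      rw [fd70, Int.le_ediv_iff_mul_le (by norm_num)]; omega
    have hpw : urlPowB id 1 = 70 * urlPowB (PySem.Int.floordiv id 70) 1 := by
      rw [urlPowB]
      rw [if_neg (by norm_num)]
      simp only [pvBase_eq]
      rw [if_pos (by omega)]
      have := pow_shift (id + 1 - 1).toNat id 1 le_rfl le_rfl (by omega)
      simpa using this
    obtain ⟨m, hm⟩ := pow_is_pow (PySem.Int.floordiv id 70 + 1 - 1).toNat
      (PySem.Int.floordiv id 70) 1 0 le_rfl (by norm_num)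
    unfold pvBf
    rw [if_neg (by omega), if_neg (by omega), hpw, hm, ← pow_succ']
    rw [emit_pow (m + 1) id]
    congr 2
    all_goals rw [fd70, pow_succ', Int.mul_ediv_cancel_left _ (by norm_num)]

theorem main_list : ∀ (n : Nat) (id : Int), id.toNat ≤ n →
    (urlLoopA id []).reverse = pvBf id := by
  intro n
  induction n with
  | zero =>
    intro id h
    have hid : id ≤ 0 := by omega
    rw [loopA_nil id hid]; simp [pvBf, hid]
  | succ n ih =>
    intro id h
    by_cases hid : 0 < id
    · rw [loopA_rec id hid, bf_rec id hid]
      have := pv_floordiv70_lt hid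
      rw [ih _ (by omega)]
    · have hid' : id ≤ 0 := by omega
      rw [loopA_nil id hid']; simp [pvBf, hid']

-- ===== VERDICT (by name: the statement is the Claim_ definition above) =====
theorem url_encoder_spec : Claim_equal_url_encoder := by
  intro id _
  unfold Spec_url_encoder url_encoder url_encoder_alt
  rw [main_list id.toNat id le_rfl]
  by_cases hid : id ≤ 0
  · simp [pvBf, hid]
  · simp [pvBf, hid]
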